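-- pv_equiv track=rewrite | github.com/dodona-edu/judge-sql | judge/sql_query.py | format_join_symbols
-- ===== SOURCE A (Python) =====
-- def format_join_symbols(symbols: list[str]) -> str:
--     """Join a list of symbols into a formatted query.
--
--     Args:
--         symbols: list of symbols
--
--     Returns:
--         formatted query
--     """
--     result = ""
--     for symbol in symbols:
--         if len(result) > 0 and symbol == ",":
--             result = result[:-1] + ", "
--         else:
--             result += symbol + " "
--
--     return result.rstrip()
-- ===== SOURCE B (Python) =====
-- def format_join_symbols(symbols: list[str]) -> str:
--     """Join a list of symbols into a formatted query.
--
--     Args: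
--         symbols: list of symbols
--
--     Returns:
--         formatted query
--     """
--     parts = []
--     i = 0
--     n = len(symbols)
--     while i < n:
--         # take the maximal run of "," symbols immediately following symbols[i]
--         j = i + 1
--         while j < n and symbols[j] == ",":
--             j += 1
--         parts.append(symbols[i] + "," * (j - i - 1))
--         i = j
--     return " ".join(parts).rstrip()
-- ===== Notes on version B (the rewrite author's own statement) =====
-- stated objective: alternative
-- what changed: B partitions the input forward into maximal runs of a symbol followed by its trailing commas (inner scan with index skip), emits symbol + ','*run_length per run, and joins the parts once with spaces, instead of A's backward string patching that slices the last character off the accumulator whenever it meets a comma.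
import Mathlib
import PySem

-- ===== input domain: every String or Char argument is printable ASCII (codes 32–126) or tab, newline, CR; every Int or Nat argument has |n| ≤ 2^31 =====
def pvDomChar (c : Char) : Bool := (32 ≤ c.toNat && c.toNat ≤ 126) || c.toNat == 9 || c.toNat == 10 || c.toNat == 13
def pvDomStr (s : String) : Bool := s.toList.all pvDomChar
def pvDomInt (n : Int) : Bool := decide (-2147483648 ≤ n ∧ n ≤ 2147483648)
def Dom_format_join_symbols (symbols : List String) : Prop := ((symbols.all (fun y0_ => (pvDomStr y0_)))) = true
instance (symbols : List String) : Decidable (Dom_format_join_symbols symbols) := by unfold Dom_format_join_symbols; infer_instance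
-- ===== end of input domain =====

-- B partitions the input forward into maximal runs "symbol followed by k commas",
-- emitting symbol + k commas per run and joining once — instead of A's backward
-- string patching (slice off the last character on each comma).

-- ===== PORT A =====
-- A accumulates a string (here: its code-point list); a comma drops the last character
-- (result[:-1]) and appends ", "; otherwise it appends symbol + " "; finally rstrip.
def format_join_symbols (symbols : List String) : String :=
  String.ofList (PySem.Chars.rstrip (symbols.foldl
    (fun result symbol =>
      if result.length > 0 && symbol == "," then
        PySem.List.slice result none (some (-1)) ++ [',', ' ']
      else
        result ++ symbol.toList ++ [' '])
    ([] : List Char)))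

-- ===== PORT B =====
-- B's outer while loop: each step takes symbols[i] plus the maximal run of ","
-- symbols right after it (the inner while loop = takeWhile/dropWhile) and emits
-- one part symbols[i] + "," * run-length; finally ' '.join(parts).rstrip().
def pvAltGo : List String → List (List Char)
  | [] => []
  | s :: rest =>
      (s.toList ++ List.replicate (rest.takeWhile (fun t => t == ",")).length ',')
        :: pvAltGo (rest.dropWhile (fun t => t == ","))
  termination_by xs => xs.length
  decreasing_by
    simp only [List.length_cons]
    exact Nat.lt_succ_of_le (List.length_dropWhile_le _ _)

def format_join_symbols_alt (symbols : List String) : String :=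
  String.ofList (PySem.Chars.rstrip (PySem.Chars.join [' '] (pvAltGo symbols)))

-- ===== PRECONDITION & SPEC =====
def Spec_format_join_symbols (symbols : List String) (out : String) : Prop := out = format_join_symbols_alt symbols
instance (symbols : List String) (out : String) : Decidable (Spec_format_join_symbols symbols out) := by unfold Spec_format_join_symbols; infer_instance

-- ===== CLAIM (what is proved, stated in full; the proofs are below) =====
def Claim_equal_format_join_symbols : Prop := ∀ (symbols : List String), Dom_format_join_symbols symbols → Spec_format_join_symbols symbols (format_join_symbols symbols)

-- ===== LEMMAS AND PROOFS =====

-- proof-only bridge: the "glue a comma onto the last token" step function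
def pvGlue (tokens : List (List Char)) (symbol : String) : List (List Char) :=
  if symbol == "," && !tokens.isEmpty then
    tokens.dropLast ++ [(tokens.getLast?.getD []) ++ [',']]
  else
    tokens ++ [symbol.toList]

-- A's accumulated string, expressed from a token list: empty for no tokens,
-- otherwise the space-join of the tokens followed by one trailing space.
def pvStateOf (tokens : List (List Char)) : List Char :=
  if tokens.isEmpty then [] else PySem.Chars.join [' '] tokens ++ [' ']

theorem pv_join_cons (sep a : List Char) (rest : List (List Char)) (h : rest ≠ []) :
    PySem.Chars.join sep (a :: rest) = a ++ sep ++ PySem.Chars.join sep rest := by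
  cases rest with
  | nil => exact absurd rfl h
  | cons b r => exact PySem.Chars.join_cons_cons sep a b r

theorem pv_join_append_singleton (sep : List Char) (ts : List (List Char)) (s : List Char)
    (h : ts ≠ []) :
    PySem.Chars.join sep (ts ++ [s]) = PySem.Chars.join sep ts ++ sep ++ s := by
  induction ts with
  | nil => exact absurd rfl h
  | cons x ts ih =>
    rw [List.cons_append, pv_join_cons sep x (ts ++ [s]) (by simp)]
    cases ts with
    | nil => simp [PySem.Chars.join_singleton]
    | cons b ts' =>
      rw [ih (by simp), pv_join_cons sep x (b :: ts') (by simp)]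
      simp

theorem pv_join_glue_last (sep : List Char) (ts : List (List Char)) (x : List Char)
    (h : ts ≠ []) :
    PySem.Chars.join sep (ts.dropLast ++ [(ts.getLast?.getD []) ++ x])
      = PySem.Chars.join sep ts ++ x := by
  induction ts with
  | nil => exact absurd rfl h
  | cons a ts ih =>
    cases ts with
    | nil => simp [PySem.Chars.join_singleton]
    | cons b ts' =>
      rw [List.dropLast_cons_of_ne_nil (by simp), List.getLast?_cons_cons, List.cons_append,
        pv_join_cons sep a _ (by simp), ih (by simp), pv_join_cons sep a (b :: ts') (by simp)]
      simp

-- loop invariant: A's fold state equals pvStateOf of the glue fold's token state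
theorem pv_fold_inv (symbols : List String) (tokens : List (List Char)) :
    symbols.foldl
      (fun result symbol =>
        if result.length > 0 && symbol == "," then
          PySem.List.slice result none (some (-1)) ++ [',', ' ']
        else
          result ++ symbol.toList ++ [' '])
      (pvStateOf tokens)
    = pvStateOf (symbols.foldl pvGlue tokens) := by
  induction symbols generalizing tokens with
  | nil => rfl
  | cons s rest ih =>
    simp only [List.foldl_cons]
    rw [← ih]
    congr 1
    by_cases hne : tokens.isEmpty
    · rcases List.isEmpty_iff.mp hne with rfl
      simp [pvStateOf, pvGlue, PySem.Chars.join_singleton]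
    · have hts : tokens ≠ [] := by simpa [List.isEmpty_iff] using hne
      have hstate : pvStateOf tokens = PySem.Chars.join [' '] tokens ++ [' '] := by
        simp [pvStateOf, hne]
      rw [hstate]
      by_cases hc : s = ","
      · subst hc
        rw [pvGlue, if_pos (by simp), if_pos (by simp [hts])]
        have h2 : pvStateOf (tokens.dropLast ++ [(tokens.getLast?.getD []) ++ [',']])
            = PySem.Chars.join [' '] (tokens.dropLast ++ [(tokens.getLast?.getD []) ++ [',']])
              ++ [' '] := by
          simp [pvStateOf]
        rw [h2, PySem.List.slice_to_neg_one, List.dropLast_concat,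
          pv_join_glue_last [' '] tokens [','] hts]
        simp
      · rw [pvGlue, if_neg (by simp [hc]), if_neg (by simp [hc])]
        have h2 : pvStateOf (tokens ++ [s.toList])
            = PySem.Chars.join [' '] (tokens ++ [s.toList]) ++ [' '] := by
          simp [pvStateOf]
        rw [h2, pv_join_append_singleton [' '] tokens s.toList hts]

-- the glue fold from a nonempty token state produces exactly B's forward run grouping
theorem pv_dropLast_getD (ts : List (List Char)) (h : ts ≠ []) :
    ts.dropLast ++ [ts.getLast?.getD []] = ts := by
  rw [List.getLast?_eq_some_getLast h, Option.getD_some, List.dropLast_append_getLast h]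

theorem pv_dropLast_getD_cons (ts A : List (List Char)) (h : ts ≠ []) :
    ts.dropLast ++ (ts.getLast?.getD []) :: A = ts ++ A := by
  rw [show (ts.getLast?.getD []) :: A = [ts.getLast?.getD []] ++ A from rfl,
    ← List.append_assoc, pv_dropLast_getD ts h]

theorem pv_fold_eq_altGo (symbols : List String) (ts : List (List Char)) (h : ts ≠ []) :
    symbols.foldl pvGlue ts
      = ts.dropLast
        ++ [(ts.getLast?.getD []) ++ List.replicate (symbols.takeWhile (fun t => t == ",")).length ',']
        ++ pvAltGo (symbols.dropWhile (fun t => t == ",")) := by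
  induction symbols generalizing ts with
  | nil =>
    simp [pvAltGo]
    exact (pv_dropLast_getD ts h).symm
  | cons s rest ih =>
    by_cases hc : s = ","
    · subst hc
      have hstep : List.foldl pvGlue ts ("," :: rest)
          = List.foldl pvGlue (ts.dropLast ++ [(ts.getLast?.getD []) ++ [',']]) rest := by
        simp [pvGlue, h]
      rw [hstep, ih _ (by simp)]
      simp [List.takeWhile, List.dropWhile, List.replicate_succ]
    · have hstep : List.foldl pvGlue ts (s :: rest)
          = List.foldl pvGlue (ts ++ [s.toList]) rest := by
        simp [pvGlue, hc]
      rw [hstep, ih _ (by simp)]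
      have hb : (s == ",") = false := by simp [hc]
      simp only [List.takeWhile, List.dropWhile, hb, List.length_nil, List.replicate_zero,
        List.append_nil, pvAltGo]
      rw [pv_dropLast_getD_cons ts _ h]
      simp

theorem pv_fold_nil_eq_altGo (symbols : List String) :
    symbols.foldl pvGlue [] = pvAltGo symbols := by
  cases symbols with
  | nil => simp [pvAltGo]
  | cons s rest =>
    have hstep : List.foldl pvGlue [] (s :: rest)
        = List.foldl pvGlue [s.toList] rest := by
      simp [pvGlue]
    rw [hstep, pv_fold_eq_altGo rest [s.toList] (by simp)]
    simp [pvAltGo]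

theorem pv_rstrip_space (cs : List Char) :
    PySem.Chars.rstrip (cs ++ [' ']) = PySem.Chars.rstrip cs := by
  simp [PySem.Chars.rstrip, show PySem.Chars.isspace ' ' = true from by decide]

-- ===== VERDICT (by name: the statement is the Claim_ definition above) =====
theorem format_join_symbols_spec : Claim_equal_format_join_symbols := by
  intro symbols _
  unfold Spec_format_join_symbols format_join_symbols format_join_symbols_alt
  have h := pv_fold_inv symbols []
  rw [show pvStateOf [] = [] from rfl] at h
  rw [h, pv_fold_nil_eq_altGo]
  cases h2 : pvAltGo symbols with
  | nil => simp [pvStateOf]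
  | cons t ts' =>
    have h3 : pvStateOf (t :: ts') = PySem.Chars.join [' '] (t :: ts') ++ [' '] := by
      simp [pvStateOf]
    rw [h3, pv_rstrip_space]
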